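-- pv_equiv track=rewrite | github.com/creda-technologies/hitch | sep_endpoints/sep12_endpoints.py | get_status_from_fields
-- ===== SOURCE A (Python) =====
-- def get_status_from_fields(fields, provided_fields) -> str:
--     if len(fields) > 0:
--         return "NEEDS_INFO"
--
--     all_statuses = [provided_fields[field]['status'] for field in provided_fields]
--     all_fields_rejected = all([status == "REJECTED" for status in all_statuses])
--
--     if all_fields_rejected: return "REJECTED"
--     elif (
--         ("VERIFICATION_REQUIRED" in all_statuses)
--             or
--         (not all_fields_rejected and "REJECTED" in all_statuses)
--         ):
--         return "NEEDS_INFO"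
--
--     elif "PROCESSING" in all_statuses : return "PROCESSING"
--
--     return "ACCEPTED"
-- ===== SOURCE B (Python) =====
-- def get_status_from_fields(fields, provided_fields) -> str:
--     if fields:
--         return "NEEDS_INFO"
--     all_rejected = True
--     saw_needs_info = False
--     saw_processing = False
--     for info in provided_fields.values():
--         s = info['status']
--         if s != "REJECTED":
--             all_rejected = False
--         if s == "VERIFICATION_REQUIRED" or s == "REJECTED":
--             saw_needs_info = True
--         if s == "PROCESSING":
--             saw_processing = True
--     if all_rejected:
--         return "REJECTED"
--     if saw_needs_info:
--         return "NEEDS_INFO"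
--     if saw_processing:
--         return "PROCESSING"
--     return "ACCEPTED"
-- ===== Notes on version B (the rewrite author's own statement) =====
-- stated objective: simpler
-- what changed: Replaces A's intermediate status list plus an all() pass and three membership scans with a single loop over provided_fields.values() maintaining three booleans (all_rejected, saw_needs_info, saw_processing).
import Mathlib
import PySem

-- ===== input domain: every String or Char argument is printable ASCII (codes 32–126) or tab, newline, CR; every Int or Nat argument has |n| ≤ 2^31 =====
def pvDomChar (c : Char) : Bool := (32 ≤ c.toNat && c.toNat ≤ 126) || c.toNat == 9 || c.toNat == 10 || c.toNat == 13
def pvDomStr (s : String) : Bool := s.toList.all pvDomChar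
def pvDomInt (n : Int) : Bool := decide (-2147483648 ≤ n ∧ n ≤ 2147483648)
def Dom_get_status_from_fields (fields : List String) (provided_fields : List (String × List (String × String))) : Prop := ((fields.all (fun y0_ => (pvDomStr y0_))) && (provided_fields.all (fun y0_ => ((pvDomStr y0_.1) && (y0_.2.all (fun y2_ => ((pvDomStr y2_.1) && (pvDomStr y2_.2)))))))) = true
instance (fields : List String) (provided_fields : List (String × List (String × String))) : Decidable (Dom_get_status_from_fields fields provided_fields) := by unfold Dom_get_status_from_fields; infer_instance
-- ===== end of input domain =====

-- B replaces A's intermediate status list and repeated membership scans by one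
-- fold over the dict's values maintaining three booleans (objective: simpler, single pass).

-- ===== PORT A =====
-- dict lookup d[k] on an association list: first matching key (none = KeyError)
def pvLookup (d : List (String × String)) (k : String) : Option String :=
  (d.find? (fun p => p.1 == k)).map (·.2)

def get_status_from_fields (fields : List String) (provided_fields : List (String × List (String × String))) : String :=
  if fields.length > 0 then "NEEDS_INFO"
  else
    -- [provided_fields[field]['status'] for field in provided_fields]  (iteration over keys, then lookup)
    let all_statuses : List (Option String) :=
      (provided_fields.map (·.1)).map (fun field =>
        ((provided_fields.find? (fun p => p.1 == field)).map (·.2)).bind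
          (fun d => pvLookup d "status"))
    let all_fields_rejected : Bool := (all_statuses.map (fun s => s == some "REJECTED")).all id
    if all_fields_rejected then "REJECTED"
    else if all_statuses.contains (some "VERIFICATION_REQUIRED")
            || (!all_fields_rejected && all_statuses.contains (some "REJECTED")) then "NEEDS_INFO"
    else if all_statuses.contains (some "PROCESSING") then "PROCESSING"
    else "ACCEPTED"

-- ===== PORT B =====
def get_status_from_fields_alt (fields : List String) (provided_fields : List (String × List (String × String))) : String :=
  if fields.length > 0 then "NEEDS_INFO"
  else
    let st : Bool × Bool × Bool :=
      provided_fields.foldl (fun (acc : Bool × Bool × Bool) kv =>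
        let s := pvLookup kv.2 "status"
        (acc.1 && (s == some "REJECTED"),
         acc.2.1 || (s == some "VERIFICATION_REQUIRED") || (s == some "REJECTED"),
         acc.2.2 || (s == some "PROCESSING"))) (true, false, false)
    if st.1 then "REJECTED"
    else if st.2.1 then "NEEDS_INFO"
    else if st.2.2 then "PROCESSING"
    else "ACCEPTED"

-- ===== PRECONDITION & SPEC =====
-- Pre_ only constrains the case fields = [] (otherwise A never touches provided_fields):
-- it excludes association lists with duplicate keys (a Python dict cannot hold them, so the
-- encoding is ambiguous there) and inner dicts without a 'status' key (A raises KeyError).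
def Pre_get_status_from_fields (fields : List String) (provided_fields : List (String × List (String × String))) : Prop :=
  fields = [] →
    ((provided_fields.map Prod.fst).Nodup ∧
     ∀ kv ∈ provided_fields, (kv.2.map Prod.fst).Nodup ∧ "status" ∈ kv.2.map Prod.fst)
instance (fields : List String) (provided_fields : List (String × List (String × String))) : Decidable (Pre_get_status_from_fields fields provided_fields) := by unfold Pre_get_status_from_fields; infer_instance

def pvWitness_get_status_from_fields : List String × (List (String × List (String × String))) :=
  ([], [("first_name", [("status", "REJECTED")]), ("email", [("status", "PROCESSING")])])

def Spec_get_status_from_fields (fields : List String) (provided_fields : List (String × List (String × String))) (out : String) : Prop := out = get_status_from_fields_alt fields provided_fields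
instance (fields : List String) (provided_fields : List (String × List (String × String))) (out : String) : Decidable (Spec_get_status_from_fields fields provided_fields out) := by unfold Spec_get_status_from_fields; infer_instance

-- ===== CLAIM (what is proved, stated in full; the proofs are below) =====
def Claim_equal_get_status_from_fields : Prop := ∀ (fields : List String) (provided_fields : List (String × List (String × String))), Dom_get_status_from_fields fields provided_fields → Pre_get_status_from_fields fields provided_fields → Spec_get_status_from_fields fields provided_fields (get_status_from_fields fields provided_fields)

-- ===== LEMMAS AND PROOFS =====

-- status of one entry, and the per-list booleans B's fold accumulates
def pvStatuses (pf : List (String × List (String × String))) : List (Option String) :=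
  pf.map (fun kv => pvLookup kv.2 "status")

-- with nodup keys, looking each key back up returns its own entry
theorem pv_find_self (pf : List (String × List (String × String)))
    (hnd : (pf.map Prod.fst).Nodup) (kv : String × List (String × String)) (hmem : kv ∈ pf) :
    pf.find? (fun p => p.1 == kv.1) = some kv := by
  induction pf with
  | nil => cases hmem
  | cons a tl ih =>
    simp only [List.map_cons, List.nodup_cons] at hnd
    rcases List.mem_cons.mp hmem with h | h
    · subst h; simp [List.find?]
    · have hne : a.1 ≠ kv.1 := by
        intro he; exact hnd.1 (he ▸ List.mem_map.mpr ⟨kv, h, rfl⟩)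
      simp only [List.find?, beq_eq_false_iff_ne.mpr hne]
      exact ih hnd.2 h

-- A's status list equals the direct map over the entries (keys nodup)
theorem pv_statuses_eq (pf : List (String × List (String × String)))
    (hnd : (pf.map Prod.fst).Nodup) :
    (pf.map (·.1)).map (fun field =>
        ((pf.find? (fun p => p.1 == field)).map (·.2)).bind (fun d => pvLookup d "status"))
      = pvStatuses pf := by
  unfold pvStatuses
  rw [List.map_map]
  refine List.map_congr_left (fun kv hmem => ?_)
  simp [pv_find_self pf hnd kv hmem]

-- B's fold computes the three scans of the status list at once
theorem pv_fold_eq (pf : List (String × List (String × String))) (a b c : Bool) :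
    pf.foldl (fun (acc : Bool × Bool × Bool) kv =>
        let s := pvLookup kv.2 "status"
        (acc.1 && (s == some "REJECTED"),
         acc.2.1 || (s == some "VERIFICATION_REQUIRED") || (s == some "REJECTED"),
         acc.2.2 || (s == some "PROCESSING"))) (a, b, c)
      = (a && ((pvStatuses pf).map (fun s => s == some "REJECTED")).all id,
         b || ((pvStatuses pf).contains (some "VERIFICATION_REQUIRED")
               || (pvStatuses pf).contains (some "REJECTED")),
         c || (pvStatuses pf).contains (some "PROCESSING")) := by
  induction pf generalizing a b c with
  | nil => simp [pvStatuses]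
  | cons kv tl ih =>
    simp only [List.foldl_cons, ih, pvStatuses, List.map_cons, List.all_cons,
      List.contains_cons]
    simp [BEq.comm, Bool.or_assoc, Bool.or_comm, Bool.or_left_comm, Bool.and_assoc]

-- ===== VERDICT (by name: the statement is the Claim_ definition above) =====
theorem get_status_from_fields_spec : Claim_equal_get_status_from_fields := by
  intro fields pf _ hpre
  unfold Spec_get_status_from_fields get_status_from_fields get_status_from_fields_alt
  cases fields with
  | cons f fs => simp
  | nil =>
    obtain ⟨hnd, _⟩ := hpre rfl
    simp only [List.length_nil, gt_iff_lt, lt_irrefl, if_false]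
    rw [pv_statuses_eq pf hnd, pv_fold_eq]
    simp only [Bool.true_and, Bool.false_or]
    by_cases hall : (((pvStatuses pf).map (fun s => s == some "REJECTED")).all id) = true
    · simp [hall]
    · simp only [Bool.not_eq_true] at hall
      simp [hall]
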